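-- pv_equiv track=rewrite | github.com/heykarimoff/leetcode | toptal_interview.py | solution
-- ===== SOURCE A (Python) =====
-- def solution(P, S):
--     # Calculate the total number of people
--     people = sum(P)
--     # Count filled cars from 0
--     cars = 0
--     # Sort cars from highest to lowest seat count
--     # For each car
--     for seat in sorted(S, reverse=True):
--         # Check if there are people left to be seated, if not then break
--         if people <= 0:
--             break
--         # Reduce the total number of people by the number of people in the car
--         people -= seat
--         # Increase the number of cars
--         cars += 1
--
--     return cars
-- ===== SOURCE B (Python) =====
-- def solution(P, S):
--     need = sum(P)
--     counts = {}
--     for s in S: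
--         counts[s] = counts.get(s, 0) + 1
--     cars = 0
--     for v in sorted(counts, reverse=True):
--         if need <= 0:
--             break
--         c = counts[v]
--         t = min(c, -(-need // v)) if v > 0 else c
--         cars += t
--         need -= v * t
--     return cars
-- ===== Notes on version B (the rewrite author's own statement) =====
-- stated objective: alternative
-- what changed: Replaces the per-seat greedy loop over the descending-sorted seat list with a bucket algorithm: a counter dict groups seats by value, then the distinct values are walked in decreasing order and each whole bucket is consumed at once with a closed-form ceiling division deciding how many cars of that size are taken.
import Mathlib
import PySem

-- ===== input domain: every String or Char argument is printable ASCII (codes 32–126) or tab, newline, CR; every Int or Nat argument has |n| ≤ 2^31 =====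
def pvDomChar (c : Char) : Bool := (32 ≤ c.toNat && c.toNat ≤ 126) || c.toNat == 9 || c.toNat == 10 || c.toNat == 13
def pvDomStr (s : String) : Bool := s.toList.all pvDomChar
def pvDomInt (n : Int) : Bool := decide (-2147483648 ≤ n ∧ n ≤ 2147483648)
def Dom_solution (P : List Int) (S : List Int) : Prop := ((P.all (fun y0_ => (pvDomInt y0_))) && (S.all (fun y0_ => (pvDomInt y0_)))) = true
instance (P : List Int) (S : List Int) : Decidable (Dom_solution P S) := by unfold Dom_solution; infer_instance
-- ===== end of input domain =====

-- B replaces A's per-seat greedy over the descending-sorted seat list with a bucket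
-- algorithm: a counter dict groups seats by value, the distinct values are walked in
-- decreasing order and each bucket is consumed at once via a ceiling division
-- (alternative algorithm); the return values are proved equal on all inputs.

-- ===== PORT A =====
-- the for-loop with break: state (people, cars)
def solutionLoop : List Int → Int → Int → Int
  | [], _, cars => cars
  | seat :: rest, people, cars =>
    if people ≤ 0 then cars
    else solutionLoop rest (people - seat) (cars + 1)

def solution (P : List Int) (S : List Int) : Int :=
  solutionLoop (PySem.List.sorted S (fun x => x) true) P.sum 0

-- ===== PORT B =====
-- the for-loop over the distinct values sorted descending: state (need, cars);
-- t = min(c, -(-need // v)) if v > 0 else c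
def bucketLoop : List Int → PySem.Dict Int Int → Int → Int → Int
  | [], _, _, cars => cars
  | v :: rest, counts, need, cars =>
    if need ≤ 0 then cars
    else
      let c := counts.getD v 0
      let t := if v > 0 then min c (-(PySem.Int.floordiv (-need) v)) else c
      bucketLoop rest counts (need - v * t) (cars + t)

def solution_alt (P : List Int) (S : List Int) : Int :=
  let need := P.sum
  let counts := S.foldl (fun d s => d.insert s (d.getD s 0 + 1)) PySem.Dict.empty
  bucketLoop (PySem.List.sorted counts.keys (fun x => x) true) counts need 0

-- ===== PRECONDITION & SPEC =====
def Spec_solution (P : List Int) (S : List Int) (out : Int) : Prop := out = solution_alt P S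
instance (P : List Int) (S : List Int) (out : Int) : Decidable (Spec_solution P S out) := by unfold Spec_solution; infer_instance

-- ===== CLAIM (what is proved, stated in full; the proofs are below) =====
def Claim_equal_solution : Prop := ∀ (P : List Int) (S : List Int), Dom_solution P S → Spec_solution P S (solution P S)

-- ===== LEMMAS AND PROOFS =====

-- A's loop returns its accumulator as soon as people ≤ 0
theorem loop_nonpos : ∀ (l : List Int) (p c : Int), p ≤ 0 → solutionLoop l p c = c := by
  intro l
  cases l with
  | nil => intro p c _; rfl
  | cons s r => intro p c hp; simp [solutionLoop, hp]

-- the unique descending rearrangement: any perm of xs that is pairwise ≥ IS sorted(xs, reverse=True)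
theorem desc_unique (xs ys : List Int) (hp : ys.Perm xs)
    (hs : ys.Pairwise (fun a b => b ≤ a)) :
    PySem.List.sorted xs (fun x => x) true = ys := by
  have h1 : PySem.List.sorted xs (fun x => x) false = ys.reverse := by
    apply PySem.List.sorted_id_eq_of_perm_of_pairwise
    · exact (List.reverse_perm ys).trans hp
    · exact (List.pairwise_reverse).mpr hs
  have h2 : PySem.List.sorted xs (fun x => x) false
      = (PySem.List.sorted xs (fun x => x) true).reverse := by
    apply PySem.List.sorted_id_eq_of_perm_of_pairwise
    · exact (List.reverse_perm _).trans (PySem.List.sorted_perm xs (fun x => x) true)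
    · exact (List.pairwise_reverse).mpr (PySem.List.sorted_pairwise_rev xs (fun x => x))
  have := h1 ▸ h2
  have h3 : (PySem.List.sorted xs (fun x => x) true).reverse.reverse = ys.reverse.reverse := by
    rw [← this]
  simpa using h3

-- A's loop on c copies of v followed by tail = one bucket step with the closed-form t
theorem loop_replicate : ∀ (c : Nat) (v need cars : Int) (tail : List Int),
    solutionLoop (List.replicate c v ++ tail) need cars =
      if need ≤ 0 then cars
      else
        (fun t => solutionLoop tail (need - v * t) (cars + t))
          (if v > 0 then min (c : Int) (-(PySem.Int.floordiv (-need) v)) else (c : Int)) := by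
  intro c
  induction c with
  | zero =>
    intro v need cars tail
    simp only [List.replicate, List.nil_append]
    by_cases hn : need ≤ 0
    · simp [hn, loop_nonpos]
    · simp only [if_neg hn]
      by_cases hv : v > 0
      · rcases (PySem.Int.neg_floordiv_neg_eq_iff_of_pos (a := need)
          (b := v) (q := -(PySem.Int.floordiv (-need) v)) hv).mp rfl with ⟨hlo, hhi⟩
        have h0q : 0 ≤ -(PySem.Int.floordiv (-need) v) := by nlinarith
        have hmin : min ((0 : Nat) : Int) (-(PySem.Int.floordiv (-need) v)) = 0 := by omega
        rw [if_pos hv, hmin]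
        simp
      · simp [hv]
  | succ c ih =>
    intro v need cars tail
    by_cases hn : need ≤ 0
    · simp [hn, loop_nonpos]
    · have hrep : List.replicate (c + 1) v ++ tail = v :: (List.replicate c v ++ tail) := by
        simp [List.replicate_succ]
      rw [hrep]
      simp only [solutionLoop, if_neg hn]
      rw [ih v (need - v) (cars + 1) tail]
      by_cases hv : v > 0
      · set q := -(PySem.Int.floordiv (-(need - v)) v) with hq
        rcases (PySem.Int.neg_floordiv_neg_eq_iff_of_pos (a := need - v)
          (b := v) (q := q) hv).mp rfl with ⟨hlo, hhi⟩
        by_cases hnv : need - v ≤ 0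
        · -- first copy already covers: ceil(need/v) = 1
          have h1 : -(PySem.Int.floordiv (-need) v) = 1 := by
            rw [PySem.Int.neg_floordiv_neg_eq_iff_of_pos hv]
            constructor <;> nlinarith
          have hmin : min ((c + 1 : Nat) : Int) (1 : Int) = 1 := by push_cast; omega
          simp only [if_pos hnv, if_pos hv, h1, hmin, mul_one]
          rw [loop_nonpos tail (need - v) (cars + 1) hnv]
        · -- ceil(need/v) = ceil((need-v)/v) + 1
          have hsucc : -(PySem.Int.floordiv (-need) v) = q + 1 := by
            rw [PySem.Int.neg_floordiv_neg_eq_iff_of_pos hv]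
            constructor <;> nlinarith
          have hmins : min ((c + 1 : Nat) : Int) (q + 1) = min (c : Int) q + 1 := by
            push_cast; omega
          simp only [if_neg hnv, if_pos hv, hsucc, hmins]
          congr 1 <;> ring
      · -- v ≤ 0 : the whole bucket is taken
        have hnv : ¬ (need - v ≤ 0) := by omega
        simp only [if_neg hnv, if_neg hv]
        congr 1 <;> push_cast <;> ring

-- main induction: a strictly decreasing list D of exactly the values of S0, with correct counts
theorem main_lemma : ∀ (D : List Int) (counts : PySem.Dict Int Int) (S0 : List Int),
    D.Pairwise (fun a b => a > b) → (∀ x, x ∈ D ↔ x ∈ S0) →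
    (∀ v ∈ D, counts.getD v 0 = (S0.count v : Int)) →
    ∀ need cars,
      solutionLoop (PySem.List.sorted S0 (fun x => x) true) need cars
        = bucketLoop D counts need cars := by
  intro D
  induction D with
  | nil =>
    intro counts S0 _ hmem _ need cars
    have hS0 : S0 = [] := by
      cases S0 with
      | nil => rfl
      | cons a t => exact absurd ((hmem a).mpr (List.mem_cons_self)) (by simp)
    subst hS0
    simp [bucketLoop, PySem.List.sorted, solutionLoop]
  | cons v rest ih =>
    intro counts S0 hpw hmem hcnt need cars
    have hvrest : ∀ x ∈ rest, v > x := (List.pairwise_cons.mp hpw).1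
    have hpwr : rest.Pairwise (fun a b => a > b) := (List.pairwise_cons.mp hpw).2
    have hmax : ∀ x ∈ S0, x ≤ v := by
      intro x hx
      rcases List.mem_cons.mp ((hmem x).mpr hx) with h | h
      · exact h ▸ le_refl v
      · exact le_of_lt (hvrest x h)
    -- split S0 into the v-bucket and the rest
    set S1 := S0.filter (fun x => !(x == v)) with hS1
    have hsplit : PySem.List.sorted S0 (fun x => x) true
        = List.replicate (S0.count v) v ++ PySem.List.sorted S1 (fun x => x) true := by
      apply desc_unique
      · -- permutation
        have h1 : S0.filter (fun x => x == v) = List.replicate (S0.count v) v :=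
          List.filter_beq v
        have h2 : (S0.filter (fun x => x == v) ++ S0.filter (fun x => !(x == v))).Perm S0 :=
          List.filter_append_perm _ S0
        have h3 : (List.replicate (S0.count v) v ++ PySem.List.sorted S1 (fun x => x) true).Perm
            (List.replicate (S0.count v) v ++ S1) :=
          List.Perm.append_left _ (PySem.List.sorted_perm S1 (fun x => x) true)
        exact h3.trans (h1 ▸ h2)
      · -- pairwise descending
        apply List.pairwise_append.mpr
        refine ⟨?_, ?_, ?_⟩
        · exact List.pairwise_replicate.mpr (Or.inr (le_refl v))
        · exact PySem.List.sorted_pairwise_rev S1 (fun x => x)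
        · intro a ha b hb
          have hav : a = v := List.eq_of_mem_replicate ha
          have hbS1 : b ∈ S1 := (PySem.List.mem_sorted S1 (fun x => x) true b).mp hb
          have hbS0 : b ∈ S0 := List.mem_of_mem_filter hbS1
          exact hav ▸ hmax b hbS0
    rw [hsplit, loop_replicate]
    have hc : counts.getD v 0 = (S0.count v : Int) := hcnt v List.mem_cons_self
    show _ = bucketLoop (v :: rest) counts need cars
    simp only [bucketLoop, hc]
    by_cases hn : need ≤ 0
    · simp [hn]
    · simp only [if_neg hn]
      apply ih counts S1 hpwr
      · intro x
        constructor
        · intro hx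
          have hxS0 : x ∈ S0 := (hmem x).mp (List.mem_cons_of_mem v hx)
          have hxv : x ≠ v := ne_of_lt (hvrest x hx)
          rw [hS1, List.mem_filter]
          exact ⟨hxS0, by simpa using hxv⟩
        · intro hx
          rw [hS1, List.mem_filter] at hx
          have hxv : x ≠ v := by simpa using hx.2
          rcases List.mem_cons.mp ((hmem x).mpr hx.1) with h | h
          · exact absurd h hxv
          · exact h
      · intro w hw
        have hwv : w ≠ v := ne_of_lt (hvrest w hw)
        have : S1.count w = S0.count w := by
          rw [hS1]
          exact List.count_filter (by simpa using hwv)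
        rw [this]
        exact hcnt w (List.mem_cons_of_mem v hw)

-- ===== VERDICT (by name: the statement is the Claim_ definition above) =====
theorem solution_spec : Claim_equal_solution := by
  intro P S _
  unfold Spec_solution solution solution_alt
  rw [PySem.Dict.foldl_insert_getD_add_one_eq_counter]
  apply main_lemma
  · -- strictly decreasing distinct values
    have hnd : (PySem.List.sorted (PySem.Dict.counter S).keys (fun x => x) true).Nodup := by
      have := PySem.Dict.nodup_keys_counter (xs := S)
      exact (PySem.List.sorted_perm (PySem.Dict.counter S).keys (fun x => x) true).nodup_iff.mpr this
    have hge := PySem.List.sorted_pairwise_rev (PySem.Dict.counter S).keys (fun x => x)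
    exact (hge.and hnd).imp (fun {a b} h => lt_of_le_of_ne h.1 (Ne.symm h.2))
  · intro x
    rw [PySem.List.mem_sorted, PySem.Dict.keys_counter, PySem.Set.mem_ofList]
  · intro v _
    exact PySem.Dict.getD_counter S v
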